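-- pv_equiv track=rewrite | github.com/StanPetr/public-test | 13.8.19 (HW-03).py | price
-- ===== SOURCE A (Python) =====
-- def price(cstmr_age: int):
--
--     prices = {
--         (0, 18): 0,
--         (18, 25): 990,
--         (25, 200): 1390
--     }
--
--     price = None
--
--     for a in prices.keys():
--         if a[0] <= cstmr_age < a[1]:
--             price = prices[a]
--
--     return price
-- ===== SOURCE B (Python) =====
-- def price(cstmr_age: int):
--     # Tiered price as accumulated increments: base 0, +990 once you reach 18, +400 more at 25.
--     if cstmr_age < 0 or cstmr_age >= 200:
--         return None
--     total = 0
--     for threshold, bump in ((18, 990), (25, 400)):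
--         if cstmr_age >= threshold:
--             total += bump
--     return total
-- ===== Notes on version B (the rewrite author's own statement) =====
-- stated objective: alternative
-- what changed: Replaced the dict-of-interval-keys membership scan by a bounds check plus additive accumulation of per-threshold price increments (990 at 18, +400 at 25); no interval table and no range-membership tests per tier.
import Mathlib
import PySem

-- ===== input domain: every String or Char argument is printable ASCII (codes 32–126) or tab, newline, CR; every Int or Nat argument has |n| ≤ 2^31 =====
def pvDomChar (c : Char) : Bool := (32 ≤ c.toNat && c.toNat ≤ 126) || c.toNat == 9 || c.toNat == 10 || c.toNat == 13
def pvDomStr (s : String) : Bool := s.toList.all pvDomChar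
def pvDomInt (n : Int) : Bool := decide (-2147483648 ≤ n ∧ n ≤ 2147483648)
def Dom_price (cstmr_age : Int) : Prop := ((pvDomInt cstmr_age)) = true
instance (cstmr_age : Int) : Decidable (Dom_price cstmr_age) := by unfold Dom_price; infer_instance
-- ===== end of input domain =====

-- B replaces A's dict-of-intervals membership scan by a bounds check plus additive accumulation of threshold increments (alternative formulation, same values everywhere).


-- ===== PORT A =====
-- loop over the dict's keys, last matching interval wins (literal transliteration of A)
def price (cstmr_age : Int) : Option Int :=
  let prices : PySem.Dict (Int × Int) Int :=
    (PySem.Dict.empty.insert (0, 18) 0).insert (18, 25) 990 |>.insert (25, 200) 1390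
  (prices.keys).foldl
    (fun price a =>
      if a.1 ≤ cstmr_age ∧ cstmr_age < a.2 then prices.get? a else price)
    none

-- ===== PORT B =====
-- B: bounds check, then accumulate per-threshold increments (no interval table)
def price_alt (cstmr_age : Int) : Option Int :=
  if cstmr_age < 0 ∨ 200 ≤ cstmr_age then none
  else
    some ((([(18, 990), (25, 400)] : List (Int × Int)).foldl
      (fun total p => if cstmr_age ≥ p.1 then total + p.2 else total) 0))

-- ===== PRECONDITION & SPEC =====
def Spec_price (cstmr_age : Int) (out : Option Int) : Prop := out = price_alt cstmr_age
instance (cstmr_age : Int) (out : Option Int) : Decidable (Spec_price cstmr_age out) := by unfold Spec_price; infer_instance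

-- ===== CLAIM (what is proved, stated in full; the proofs are below) =====
def Claim_equal_price : Prop := ∀ (cstmr_age : Int), Dom_price cstmr_age → Spec_price cstmr_age (price cstmr_age)

-- ===== LEMMAS AND PROOFS =====

-- ===== VERDICT (by name: the statement is the Claim_ definition above) =====
theorem price_spec : Claim_equal_price := by
  intro cstmr_age _
  unfold Spec_price price price_alt
  simp [PySem.Dict.keys, PySem.Dict.insert, PySem.Dict.empty, PySem.Dict.get?, List.foldl]
  split_ifs <;> first | rfl | omega
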